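-- pv_equiv track=rewrite | github.com/carlbalmer/onboard-switches-iac | topologyDiscovery/discovery/HirschmannDiscovery.py | _parse_hirschmann_lldp
-- ===== SOURCE A (Python) =====
-- from typing import Dict, List, Any, Optional
--
-- def _parse_hirschmann_lldp(output: str) -> List[Dict[str, Any]]:
--     """
--     Parse Hirschmann LLDP neighbor output.
--
--     Args:
--         output: Raw LLDP output
--
--     Returns:
--         List of neighbor dictionaries
--     """
--     neighbors = []
--
--     # Parse LLDP output - this would need adjustment based on actual format
--     lines = output.split('\n')
--     current_neighbor = {}
--
--     for line in lines:
--         line = line.strip()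
--         if not line:
--             continue
--
--         # Look for LLDP neighbor entries
--         if "Local Interface" in line or "Port ID" in line:
--             if current_neighbor:
--                 neighbors.append(current_neighbor)
--                 current_neighbor = {}
--
--         # Parse individual fields
--         if ":" in line:
--             key, value = line.split(":", 1)
--             key = key.strip().lower().replace(" ", "_")
--             value = value.strip()
--             current_neighbor[key] = value
--
--     if current_neighbor:
--         neighbors.append(current_neighbor)
--
--     return neighbors
-- ===== SOURCE B (Python) =====
-- from typing import Dict, List, Any
--
--
-- def _group_to_dict(group: List[str]) -> Dict[str, Any]:
--     result = {}
--     for line in group: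
--         key, value = line.split(":", 1)
--         result[key.strip().lower().replace(" ", "_")] = value.strip()
--     return result
--
--
-- def _parse_hirschmann_lldp(output: str) -> List[Dict[str, Any]]:
--     # First pass: segment stripped lines into groups of ':'-field lines,
--     # starting a new group at a header line once the current group has a field.
--     done, cur = [], []
--     for raw in output.split('\n'):
--         line = raw.strip()
--         if ("Local Interface" in line or "Port ID" in line) and cur:
--             done.append(cur)
--             cur = []
--         if ":" in line:
--             cur.append(line)
--     done.append(cur)
--     # Second pass: turn each non-empty group into a neighbor dict.
--     return [_group_to_dict(g) for g in done if g]
-- ===== Notes on version B (the rewrite author's own statement) =====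
-- stated objective: alternative
-- what changed: A's single interleaved loop that builds and flushes neighbor dicts is replaced by a segment-then-parse decomposition: a first pass groups the colon-separated field lines per neighbor into lists, a second pass maps each non-empty group to a dict.
import Mathlib
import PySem

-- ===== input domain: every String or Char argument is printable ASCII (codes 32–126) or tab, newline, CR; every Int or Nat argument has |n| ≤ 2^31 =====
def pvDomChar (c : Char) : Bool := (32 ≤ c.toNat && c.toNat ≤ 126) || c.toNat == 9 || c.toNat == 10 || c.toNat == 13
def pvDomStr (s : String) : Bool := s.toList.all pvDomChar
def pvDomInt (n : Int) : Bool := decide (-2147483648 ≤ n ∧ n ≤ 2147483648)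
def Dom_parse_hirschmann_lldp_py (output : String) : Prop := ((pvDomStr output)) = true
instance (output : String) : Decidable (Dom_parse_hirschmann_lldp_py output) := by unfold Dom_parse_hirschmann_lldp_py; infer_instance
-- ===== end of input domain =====

-- B replaces A's interleaved accumulate/flush dict loop by a segment-then-parse decomposition
-- (first group the colon-separated field lines per neighbor, then map each group to a dict); objective: alternative.

-- ===== PORT A =====
-- shared with B (both Pythons parse a field line and test header lines with the same expressions)
def pvHeader (line : String) : Bool :=
  PySem.Str.isIn "Local Interface" line || PySem.Str.isIn "Port ID" line

-- key, value = line.split(":", 1); key = key.strip().lower().replace(" ", "_"); value = value.strip()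
def pvField (line : String) : String × String :=
  let parts := (PySem.Str.splitMax? line ":" 1).getD [line]
  (PySem.Str.replace (PySem.Str.lower (PySem.Str.strip (parts.getD 0 ""))) " " "_",
   PySem.Str.strip (parts.getD 1 ""))

def stepA (st : List (List (String × String)) × PySem.Dict String String) (raw : String) :
    List (List (String × String)) × PySem.Dict String String :=
  let line := PySem.Str.strip raw
  if line = "" then st
  else
    let st1 :=
      if pvHeader line then
        if st.2.items ≠ [] then (st.1 ++ [st.2.items], PySem.Dict.empty) else st
      else st
    if PySem.Str.isIn ":" line then
      let kv := pvField line
      (st1.1, st1.2.insert kv.1 kv.2)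
    else st1

def parse_hirschmann_lldp_py (output : String) : List (List (String × String)) :=
  let r := ((PySem.Str.split? output "\n").getD []).foldl stepA ([], PySem.Dict.empty)
  if r.2.items ≠ [] then r.1 ++ [r.2.items] else r.1

-- ===== PORT B =====
def pvGroupFold (g : List String) : PySem.Dict String String :=
  g.foldl (fun d l => let kv := pvField l; d.insert kv.1 kv.2) PySem.Dict.empty

def pvGroupDict (g : List String) : List (String × String) :=
  (pvGroupFold g).items

def stepB (st : List (List String) × List String) (raw : String) :
    List (List String) × List String :=
  let line := PySem.Str.strip raw
  let st1 := if pvHeader line && !st.2.isEmpty then (st.1 ++ [st.2], ([] : List String)) else st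
  if PySem.Str.isIn ":" line then (st1.1, st1.2 ++ [line]) else st1

def parse_hirschmann_lldp_py_alt (output : String) : List (List (String × String)) :=
  let r := ((PySem.Str.split? output "\n").getD []).foldl stepB ([], [])
  ((r.1 ++ [r.2]).filter (fun g => !g.isEmpty)).map pvGroupDict

-- ===== PRECONDITION & SPEC =====
def Spec_parse_hirschmann_lldp_py (output : String) (out : List (List (String × String))) : Prop := out = parse_hirschmann_lldp_py_alt output
instance (output : String) (out : List (List (String × String))) : Decidable (Spec_parse_hirschmann_lldp_py output out) := by unfold Spec_parse_hirschmann_lldp_py; infer_instance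

-- ===== CLAIM (what is proved, stated in full; the proofs are below) =====
def Claim_equal_parse_hirschmann_lldp_py : Prop := ∀ (output : String), Dom_parse_hirschmann_lldp_py output → Spec_parse_hirschmann_lldp_py output (parse_hirschmann_lldp_py output)

-- ===== LEMMAS AND PROOFS =====

lemma items_insert_ne_nil (d : PySem.Dict String String) (k v : String) :
    (d.insert k v).items ≠ [] := by
  rw [PySem.Dict.items_insert]
  by_cases h : d.contains k = true
  · simp only [h, if_true]
    intro hmap
    have : d.keys = [] := by
      have := List.map_eq_nil_iff.mp hmap
      simp [PySem.Dict.keys, this]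
    have hc := PySem.Dict.contains_iff_mem_keys (d := d) (k := k)
    rw [this] at hc
    simp [h] at hc
  · simp [h]

lemma groupFold_items_ne_nil (g : List String) (d : PySem.Dict String String)
    (hd : d.items ≠ []) :
    (g.foldl (fun d l => let kv := pvField l; d.insert kv.1 kv.2) d).items ≠ [] := by
  induction g generalizing d with
  | nil => exact hd
  | cons x t ih => exact ih _ (items_insert_ne_nil _ _ _)

lemma groupDict_ne_nil (g : List String) (hg : g ≠ []) : pvGroupDict g ≠ [] := by
  cases g with
  | nil => exact absurd rfl hg
  | cons x t =>
    unfold pvGroupDict pvGroupFold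
    simp only [List.foldl_cons]
    exact groupFold_items_ne_nil t _ (items_insert_ne_nil _ _ _)

lemma groupDict_eq_nil_iff (g : List String) : pvGroupDict g = [] ↔ g = [] := by
  constructor
  · intro h
    by_contra hg
    exact groupDict_ne_nil g hg h
  · rintro rfl; rfl

lemma stepB_preserves (done : List (List String)) (cur : List String) (raw : String)
    (h : ∀ g ∈ done, g ≠ []) :
    ∀ g ∈ (stepB (done, cur) raw).1, g ≠ [] := by
  intro g hg
  simp only [stepB] at hg
  by_cases h1 : (pvHeader (PySem.Str.strip raw) && !cur.isEmpty) = true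
  · rw [if_pos h1] at hg
    have hcur : cur ≠ [] := by
      have h2 := ((Bool.and_eq_true _ _).mp h1).2
      simpa using h2
    by_cases h2 : PySem.Str.isIn ":" (PySem.Str.strip raw) = true
    · rw [if_pos h2] at hg
      simp only at hg
      rcases List.mem_append.mp hg with hg | hg
      · exact h g hg
      · rw [List.mem_singleton.mp hg]; exact hcur
    · rw [if_neg h2] at hg
      simp only at hg
      rcases List.mem_append.mp hg with hg | hg
      · exact h g hg
      · rw [List.mem_singleton.mp hg]; exact hcur
  · rw [if_neg h1] at hg
    by_cases h2 : PySem.Str.isIn ":" (PySem.Str.strip raw) = true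
    · rw [if_pos h2] at hg; exact h g hg
    · rw [if_neg h2] at hg; exact h g hg

lemma step_sim (done : List (List String)) (cur : List String) (raw : String) :
    stepA (done.map pvGroupDict, pvGroupFold cur) raw
      = ((stepB (done, cur) raw).1.map pvGroupDict, pvGroupFold (stepB (done, cur) raw).2) := by
  simp only [stepA, stepB]
  generalize PySem.Str.strip raw = line
  have hiff : (pvGroupFold cur).items ≠ [] ↔ (!cur.isEmpty) = true := by
    rw [show (pvGroupFold cur).items = pvGroupDict cur from rfl]
    constructor
    · intro h
      cases cur with
      | nil => exact absurd rfl h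
      | cons a b => rfl
    · intro h hn
      have hcn : cur = [] := (groupDict_eq_nil_iff cur).mp hn
      rw [hcn] at h; simp at h
  by_cases hnil : line = ""
  · subst hnil
    have hh : pvHeader "" = false := by decide
    have hc : PySem.Str.isIn ":" "" = false := by decide
    simp only [hh, hc, Bool.false_and, Bool.false_eq_true, if_false]
    simp
  · rw [if_neg hnil]
    by_cases hh : pvHeader line = true
    · by_cases hcur : (!cur.isEmpty) = true
      · have h2 : (pvGroupFold cur).items ≠ [] := hiff.mpr hcur
        rw [if_pos hh, if_pos h2]
        simp only [hh, hcur, Bool.and_self, if_true]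
        by_cases hc : PySem.Str.isIn ":" line = true
        · rw [if_pos hc, if_pos hc]
          simp [pvGroupDict, pvGroupFold]
        · rw [if_neg hc, if_neg hc]
          simp [pvGroupDict, pvGroupFold]
      · have h2 : ¬ (pvGroupFold cur).items ≠ [] := fun h => hcur (hiff.mp h)
        rw [if_pos hh, if_neg h2]
        have hb : (pvHeader line && !cur.isEmpty) = false := by
          rw [Bool.eq_false_iff]
          intro hx
          exact hcur ((Bool.and_eq_true _ _).mp hx).2
        simp only [hb, Bool.false_eq_true, if_false]
        by_cases hc : PySem.Str.isIn ":" line = true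
        · rw [if_pos hc, if_pos hc]
          simp [pvGroupFold, List.foldl_append]
        · rw [if_neg hc, if_neg hc]
    · have hh' : pvHeader line = false := Bool.eq_false_iff.mpr hh
      rw [if_neg hh]
      simp only [hh', Bool.false_and, Bool.false_eq_true, if_false]
      by_cases hc : PySem.Str.isIn ":" line = true
      · rw [if_pos hc, if_pos hc]
        simp [pvGroupFold, List.foldl_append]
      · rw [if_neg hc, if_neg hc]

lemma fold_sim (lines : List String) (done : List (List String)) (cur : List String) :
    lines.foldl stepA (done.map pvGroupDict, pvGroupFold cur)
      = ((lines.foldl stepB (done, cur)).1.map pvGroupDict,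
         pvGroupFold (lines.foldl stepB (done, cur)).2) := by
  induction lines generalizing done cur with
  | nil => rfl
  | cons raw rest ih =>
    simp only [List.foldl_cons]
    rw [step_sim]
    generalize stepB (done, cur) raw = s
    exact ih s.1 s.2

lemma fold_stepB_nonempty (lines : List String) (done : List (List String)) (cur : List String)
    (h : ∀ g ∈ done, g ≠ []) :
    ∀ g ∈ (lines.foldl stepB (done, cur)).1, g ≠ [] := by
  induction lines generalizing done cur with
  | nil => exact h
  | cons raw rest ih =>
    simp only [List.foldl_cons]
    have hp := stepB_preserves done cur raw h
    generalize hs : stepB (done, cur) raw = s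
    rw [hs] at hp
    exact ih s.1 s.2 hp

-- ===== VERDICT (by name: the statement is the Claim_ definition above) =====
theorem parse_hirschmann_lldp_py_spec : Claim_equal_parse_hirschmann_lldp_py := by
  intro output _
  unfold Spec_parse_hirschmann_lldp_py parse_hirschmann_lldp_py parse_hirschmann_lldp_py_alt
  have h0 := fold_sim ((PySem.Str.split? output "\n").getD []) [] []
  simp only [List.map_nil] at h0
  rw [show pvGroupFold [] = PySem.Dict.empty from rfl] at h0
  set r := ((PySem.Str.split? output "\n").getD []).foldl stepB ([], []) with hr
  have hne : ∀ g ∈ r.1, g ≠ [] :=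
    fold_stepB_nonempty ((PySem.Str.split? output "\n").getD []) [] [] (by simp)
  simp only [h0]
  rw [List.filter_append]
  have hfd : r.1.filter (fun g => !g.isEmpty) = r.1 := by
    apply List.filter_eq_self.mpr
    intro g hg
    cases g with
    | nil => exact absurd rfl (hne [] hg)
    | cons a b => rfl
  rw [hfd]
  by_cases hc : r.2 = []
  · rw [hc]
    have he : (pvGroupFold ([] : List String)).items = [] := rfl
    simp [he]
  · have h1 : (pvGroupFold r.2).items ≠ [] := by
      have := groupDict_ne_nil r.2 hc
      simpa [pvGroupDict] using this
    have hb : (!r.2.isEmpty) = true := by simpa using hc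
    have h2 : List.filter (fun g => !g.isEmpty) [r.2] = [r.2] := by
      simp [List.filter_cons, hb]
    rw [h2, if_pos h1, List.map_append, List.map_cons, List.map_nil]
    rfl
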